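-- pv_equiv track=rewrite | github.com/DanielMravec/SchoolCode | AP Creative Task.py | trianglePixels
-- ===== SOURCE A (Python) =====
-- import pygame, math, time
--
-- def crossProductVect(origin, vectA, vectB):
--     return (vectA[0] - origin[0]) * (vectB[1] - origin[1]) - (vectA[1] - origin[1]) * (vectB[0] - origin[0])
--
-- def insideTriangle(point, triangle):
--     p1, p2, p3 = triangle
--
--     c1 = crossProductVect(p1, p2, point)
--     c2 = crossProductVect(p2, p3, point)
--     c3 = crossProductVect(p3, p1, point)
--
--     return (c1 >= 0 and c2 >= 0 and c3 >= 0) or (c1 <= 0 and c2 <= 0 and c3 <= 0)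
--
-- def trianglePixels(triangle):
--     pixels = []
--
--     xSorted = sorted(triangle, key=lambda x: x[0])
--     ySorted = sorted(triangle, key=lambda x: x[1])
--
--     xMin = xSorted[0][0]
--     xMax = xSorted[2][0]
--     yMin = ySorted[0][1]
--     yMax = ySorted[2][1]
--
--     for x in range(math.floor(xMin), math.ceil(xMax + 1)):
--         for y in range(math.floor(yMin), math.ceil(yMax + 1)):
--             point = (x, y)
--             if insideTriangle(point, triangle):
--                 pixels.append(point)
--     return pixels
-- ===== SOURCE B (Python) =====
-- def _clipGe(a, b, lo, hi):
--     # intersect {y : a*y + b >= 0} with the integer interval [lo, hi] (empty iff lo > hi)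
--     if a > 0:
--         return max(lo, -(b // a)), hi
--     if a < 0:
--         return lo, min(hi, b // (-a))
--     if b >= 0:
--         return lo, hi
--     return lo, lo - 1
--
--
-- def trianglePixels(triangle):
--     (x1, y1), (x2, y2), (x3, y3) = triangle
--     xMin = min(x1, x2, x3)
--     xMax = max(x1, x2, x3)
--     yMin = min(y1, y2, y3)
--     yMax = max(y1, y2, y3)
--     pixels = []
--     for x in range(xMin, xMax + 1):
--         # along the vertical line at x, each edge cross-product is a*y + b
--         edges = [(x2 - x1, -(x2 - x1) * y1 - (y2 - y1) * (x - x1)),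
--                  (x3 - x2, -(x3 - x2) * y2 - (y3 - y2) * (x - x2)),
--                  (x1 - x3, -(x1 - x3) * y3 - (y1 - y3) * (x - x3))]
--         plo, phi = yMin, yMax
--         nlo, nhi = yMin, yMax
--         for a, b in edges:
--             plo, phi = _clipGe(a, b, plo, phi)
--             nlo, nhi = _clipGe(-a, -b, nlo, nhi)
--         if plo > phi:
--             lo, hi = nlo, nhi
--         elif nlo > nhi:
--             lo, hi = plo, phi
--         else:
--             lo, hi = min(plo, nlo), max(phi, nhi)
--         for y in range(lo, hi + 1):
--             pixels.append((x, y))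
--     return pixels
-- ===== Notes on version B (the rewrite author's own statement) =====
-- stated objective: faster
-- what changed: Instead of testing insideTriangle at every (x,y) of the bounding box, B clips, per column x, the three edge half-plane constraints (each linear in y) to an integer y-interval for each orientation and emits that column's run of pixels directly.
import Mathlib
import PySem

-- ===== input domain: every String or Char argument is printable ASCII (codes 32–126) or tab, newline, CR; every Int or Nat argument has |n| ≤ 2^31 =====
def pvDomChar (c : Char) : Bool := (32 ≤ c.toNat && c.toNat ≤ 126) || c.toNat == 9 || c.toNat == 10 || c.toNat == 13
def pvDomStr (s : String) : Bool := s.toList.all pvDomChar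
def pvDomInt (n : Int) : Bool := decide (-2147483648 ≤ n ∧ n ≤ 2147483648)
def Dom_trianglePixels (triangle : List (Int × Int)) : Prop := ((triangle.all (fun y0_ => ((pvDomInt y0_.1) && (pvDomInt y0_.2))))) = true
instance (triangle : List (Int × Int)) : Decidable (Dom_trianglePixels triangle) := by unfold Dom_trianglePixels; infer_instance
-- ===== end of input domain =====

-- B replaces A's per-pixel inner loop by per-column interval clipping (half-plane
-- intersection along each vertical line), emitting each column's y-run directly: fewer
-- operations per column than per pixel of the bounding box (objective: faster).

-- ===== PORT A =====
def crossProductVect (origin vectA vectB : Int × Int) : Int :=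
  (vectA.1 - origin.1) * (vectB.2 - origin.2) - (vectA.2 - origin.2) * (vectB.1 - origin.1)

def insideTriangle (point : Int × Int) (triangle : List (Int × Int)) : Bool :=
  match triangle with
  | [p1, p2, p3] =>
    let c1 := crossProductVect p1 p2 point
    let c2 := crossProductVect p2 p3 point
    let c3 := crossProductVect p3 p1 point
    decide ((c1 ≥ 0 ∧ c2 ≥ 0 ∧ c3 ≥ 0) ∨ (c1 ≤ 0 ∧ c2 ≤ 0 ∧ c3 ≤ 0))
  | _ => false  -- Python raises ValueError here (unpacking); outside Pre_

def trianglePixels (triangle : List (Int × Int)) : List (Int × Int) :=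
  let xSorted := PySem.List.sorted triangle (fun p => p.1) false
  let ySorted := PySem.List.sorted triangle (fun p => p.2) false
  let xMin := (PySem.List.pyGetD xSorted 0 ((0:Int), (0:Int))).1
  let xMax := (PySem.List.pyGetD xSorted 2 ((0:Int), (0:Int))).1   -- IndexError outside Pre_
  let yMin := (PySem.List.pyGetD ySorted 0 ((0:Int), (0:Int))).2
  let yMax := (PySem.List.pyGetD ySorted 2 ((0:Int), (0:Int))).2
  -- math.floor / math.ceil on ints are the identity
  (PySem.List.pyRange xMin (xMax + 1) 1).foldl (fun pixels x =>
    (PySem.List.pyRange yMin (yMax + 1) 1).foldl (fun pixels y =>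
      if insideTriangle (x, y) triangle then pixels ++ [(x, y)] else pixels) pixels) []

-- ===== PORT B =====
def clipGe (a b lo hi : Int) : Int × Int :=
  if a > 0 then (max lo (-(PySem.Int.floordiv b a)), hi)
  else if a < 0 then (lo, min hi (PySem.Int.floordiv b (-a)))
  else if b ≥ 0 then (lo, hi)
  else (lo, lo - 1)

def trianglePixels_alt (triangle : List (Int × Int)) : List (Int × Int) :=
  match triangle with
  | [(x1, y1), (x2, y2), (x3, y3)] =>
    let xMin := min x1 (min x2 x3)
    let xMax := max x1 (max x2 x3)
    let yMin := min y1 (min y2 y3)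
    let yMax := max y1 (max y2 y3)
    (PySem.List.pyRange xMin (xMax + 1) 1).foldl (fun pixels x =>
      let edges : List (Int × Int) :=
        [(x2 - x1, -(x2 - x1) * y1 - (y2 - y1) * (x - x1)),
         (x3 - x2, -(x3 - x2) * y2 - (y3 - y2) * (x - x2)),
         (x1 - x3, -(x1 - x3) * y3 - (y1 - y3) * (x - x3))]
      let p := edges.foldl (fun s e => clipGe e.1 e.2 s.1 s.2) (yMin, yMax)
      let n := edges.foldl (fun s e => clipGe (-e.1) (-e.2) s.1 s.2) (yMin, yMax)
      let lohi := if p.1 > p.2 then n else if n.1 > n.2 then p else (min p.1 n.1, max p.2 n.2)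
      pixels ++ (PySem.List.pyRange lohi.1 (lohi.2 + 1) 1).map (fun y => (x, y))) []
  | _ => []  -- Python raises ValueError here (unpacking); outside Pre_

-- ===== PRECONDITION & SPEC =====
-- Pre_ excludes exactly the inputs where Python A raises: a triangle that is not 3 points
-- (tuple unpacking in insideTriangle / indexing xSorted[2] raise there).
def Pre_trianglePixels (triangle : List (Int × Int)) : Prop := triangle.length = 3
instance (triangle : List (Int × Int)) : Decidable (Pre_trianglePixels triangle) := by unfold Pre_trianglePixels; infer_instance

def pvWitness_trianglePixels : (List (Int × Int)) := [(0, 0), (4, 1), (1, 3)]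

def Spec_trianglePixels (triangle : List (Int × Int)) (out : List (Int × Int)) : Prop := out = trianglePixels_alt triangle
instance (triangle : List (Int × Int)) (out : List (Int × Int)) : Decidable (Spec_trianglePixels triangle out) := by unfold Spec_trianglePixels; infer_instance

-- ===== CLAIM (what is proved, stated in full; the proofs are below) =====
def Claim_equal_trianglePixels : Prop := ∀ (triangle : List (Int × Int)), Dom_trianglePixels triangle → Pre_trianglePixels triangle → Spec_trianglePixels triangle (trianglePixels triangle)

-- ===== LEMMAS AND PROOFS =====

theorem clipGe_mem (a b lo hi : Int) : ∀ y : Int,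
    ((clipGe a b lo hi).1 ≤ y ∧ y ≤ (clipGe a b lo hi).2) ↔ ((lo ≤ y ∧ y ≤ hi) ∧ 0 ≤ a * y + b) := by
  intro y
  unfold clipGe
  split_ifs with h1 h2 h3
  · have hd : (-y ≤ PySem.Int.floordiv b a) ↔ -y * a ≤ b := PySem.Int.le_floordiv_iff_mul_le h1
    simp only [max_le_iff]
    constructor
    · rintro ⟨⟨hl, hf⟩, hh⟩
      have := hd.mp (by omega)
      exact ⟨⟨hl, hh⟩, by nlinarith⟩
    · rintro ⟨⟨hl, hh⟩, hc⟩
      have : -y * a ≤ b := by nlinarith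
      have := hd.mpr this
      exact ⟨⟨hl, by omega⟩, hh⟩
  · have hpos : 0 < -a := by omega
    have hd : (PySem.Int.floordiv b (-a) < y) ↔ b < y * (-a) := PySem.Int.floordiv_lt_iff_lt_mul hpos
    simp only [le_min_iff]
    constructor
    · rintro ⟨hl, hh, hf⟩
      have : ¬ b < y * (-a) := fun hc => absurd (hd.mpr hc) (by omega)
      exact ⟨⟨hl, hh⟩, by nlinarith⟩
    · rintro ⟨⟨hl, hh⟩, hc⟩
      have : ¬ (PySem.Int.floordiv b (-a) < y) := fun hcc => by nlinarith [hd.mp hcc]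
      exact ⟨hl, hh, by omega⟩
  · have ha : a = 0 := by omega
    subst ha; simp; omega
  · have ha : a = 0 := by omega
    subst ha; simp; omega

theorem rowInterval_spec (a1 b1 a2 b2 a3 b3 yMin yMax : Int) (hz : a1 + a2 + a3 = 0) :
    ∀ y : Int,
      ((if ([(a1,b1),(a2,b2),(a3,b3)].foldl (fun (s : Int × Int) (e : Int × Int) => clipGe e.1 e.2 s.1 s.2) (yMin, yMax)).1 >
            ([(a1,b1),(a2,b2),(a3,b3)].foldl (fun (s : Int × Int) (e : Int × Int) => clipGe e.1 e.2 s.1 s.2) (yMin, yMax)).2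
        then ([(a1,b1),(a2,b2),(a3,b3)].foldl (fun (s : Int × Int) (e : Int × Int) => clipGe (-e.1) (-e.2) s.1 s.2) (yMin, yMax))
        else if ([(a1,b1),(a2,b2),(a3,b3)].foldl (fun (s : Int × Int) (e : Int × Int) => clipGe (-e.1) (-e.2) s.1 s.2) (yMin, yMax)).1 >
            ([(a1,b1),(a2,b2),(a3,b3)].foldl (fun (s : Int × Int) (e : Int × Int) => clipGe (-e.1) (-e.2) s.1 s.2) (yMin, yMax)).2
        then ([(a1,b1),(a2,b2),(a3,b3)].foldl (fun (s : Int × Int) (e : Int × Int) => clipGe e.1 e.2 s.1 s.2) (yMin, yMax))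
        else (min ([(a1,b1),(a2,b2),(a3,b3)].foldl (fun (s : Int × Int) (e : Int × Int) => clipGe e.1 e.2 s.1 s.2) (yMin, yMax)).1
                  ([(a1,b1),(a2,b2),(a3,b3)].foldl (fun (s : Int × Int) (e : Int × Int) => clipGe (-e.1) (-e.2) s.1 s.2) (yMin, yMax)).1,
              max ([(a1,b1),(a2,b2),(a3,b3)].foldl (fun (s : Int × Int) (e : Int × Int) => clipGe e.1 e.2 s.1 s.2) (yMin, yMax)).2
                  ([(a1,b1),(a2,b2),(a3,b3)].foldl (fun (s : Int × Int) (e : Int × Int) => clipGe (-e.1) (-e.2) s.1 s.2) (yMin, yMax)).2)).1 ≤ y ∧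
       y ≤ (if ([(a1,b1),(a2,b2),(a3,b3)].foldl (fun (s : Int × Int) (e : Int × Int) => clipGe e.1 e.2 s.1 s.2) (yMin, yMax)).1 >
            ([(a1,b1),(a2,b2),(a3,b3)].foldl (fun (s : Int × Int) (e : Int × Int) => clipGe e.1 e.2 s.1 s.2) (yMin, yMax)).2
        then ([(a1,b1),(a2,b2),(a3,b3)].foldl (fun (s : Int × Int) (e : Int × Int) => clipGe (-e.1) (-e.2) s.1 s.2) (yMin, yMax))
        else if ([(a1,b1),(a2,b2),(a3,b3)].foldl (fun (s : Int × Int) (e : Int × Int) => clipGe (-e.1) (-e.2) s.1 s.2) (yMin, yMax)).1 >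
            ([(a1,b1),(a2,b2),(a3,b3)].foldl (fun (s : Int × Int) (e : Int × Int) => clipGe (-e.1) (-e.2) s.1 s.2) (yMin, yMax)).2
        then ([(a1,b1),(a2,b2),(a3,b3)].foldl (fun (s : Int × Int) (e : Int × Int) => clipGe e.1 e.2 s.1 s.2) (yMin, yMax))
        else (min ([(a1,b1),(a2,b2),(a3,b3)].foldl (fun (s : Int × Int) (e : Int × Int) => clipGe e.1 e.2 s.1 s.2) (yMin, yMax)).1
                  ([(a1,b1),(a2,b2),(a3,b3)].foldl (fun (s : Int × Int) (e : Int × Int) => clipGe (-e.1) (-e.2) s.1 s.2) (yMin, yMax)).1,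
              max ([(a1,b1),(a2,b2),(a3,b3)].foldl (fun (s : Int × Int) (e : Int × Int) => clipGe e.1 e.2 s.1 s.2) (yMin, yMax)).2
                  ([(a1,b1),(a2,b2),(a3,b3)].foldl (fun (s : Int × Int) (e : Int × Int) => clipGe (-e.1) (-e.2) s.1 s.2) (yMin, yMax)).2)).2)
      ↔ (yMin ≤ y ∧ y ≤ yMax ∧
          ((0 ≤ a1*y+b1 ∧ 0 ≤ a2*y+b2 ∧ 0 ≤ a3*y+b3) ∨ (a1*y+b1 ≤ 0 ∧ a2*y+b2 ≤ 0 ∧ a3*y+b3 ≤ 0))) := by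
  intro y
  simp only [List.foldl_cons, List.foldl_nil]
  have h1 := clipGe_mem a1 b1 yMin yMax
  have h2 : ∀ z, ((clipGe a2 b2 (clipGe a1 b1 yMin yMax).1 (clipGe a1 b1 yMin yMax).2).1 ≤ z ∧
      z ≤ (clipGe a2 b2 (clipGe a1 b1 yMin yMax).1 (clipGe a1 b1 yMin yMax).2).2) ↔
      (((yMin ≤ z ∧ z ≤ yMax) ∧ 0 ≤ a1*z+b1) ∧ 0 ≤ a2*z+b2) :=
    fun z => (clipGe_mem a2 b2 _ _ z).trans (and_congr_left' (h1 z))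
  have hP : ∀ z, ((clipGe a3 b3 (clipGe a2 b2 (clipGe a1 b1 yMin yMax).1 (clipGe a1 b1 yMin yMax).2).1
        (clipGe a2 b2 (clipGe a1 b1 yMin yMax).1 (clipGe a1 b1 yMin yMax).2).2).1 ≤ z ∧
      z ≤ (clipGe a3 b3 (clipGe a2 b2 (clipGe a1 b1 yMin yMax).1 (clipGe a1 b1 yMin yMax).2).1
        (clipGe a2 b2 (clipGe a1 b1 yMin yMax).1 (clipGe a1 b1 yMin yMax).2).2).2) ↔
      ((((yMin ≤ z ∧ z ≤ yMax) ∧ 0 ≤ a1*z+b1) ∧ 0 ≤ a2*z+b2) ∧ 0 ≤ a3*z+b3) :=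
    fun z => (clipGe_mem a3 b3 _ _ z).trans (and_congr_left' (h2 z))
  have g1 := clipGe_mem (-a1) (-b1) yMin yMax
  have g2 : ∀ z, ((clipGe (-a2) (-b2) (clipGe (-a1) (-b1) yMin yMax).1 (clipGe (-a1) (-b1) yMin yMax).2).1 ≤ z ∧
      z ≤ (clipGe (-a2) (-b2) (clipGe (-a1) (-b1) yMin yMax).1 (clipGe (-a1) (-b1) yMin yMax).2).2) ↔
      (((yMin ≤ z ∧ z ≤ yMax) ∧ 0 ≤ -a1*z+ -b1) ∧ 0 ≤ -a2*z+ -b2) :=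
    fun z => (clipGe_mem (-a2) (-b2) _ _ z).trans (and_congr_left' (g1 z))
  have hN : ∀ z, ((clipGe (-a3) (-b3) (clipGe (-a2) (-b2) (clipGe (-a1) (-b1) yMin yMax).1 (clipGe (-a1) (-b1) yMin yMax).2).1
        (clipGe (-a2) (-b2) (clipGe (-a1) (-b1) yMin yMax).1 (clipGe (-a1) (-b1) yMin yMax).2).2).1 ≤ z ∧
      z ≤ (clipGe (-a3) (-b3) (clipGe (-a2) (-b2) (clipGe (-a1) (-b1) yMin yMax).1 (clipGe (-a1) (-b1) yMin yMax).2).1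
        (clipGe (-a2) (-b2) (clipGe (-a1) (-b1) yMin yMax).1 (clipGe (-a1) (-b1) yMin yMax).2).2).2) ↔
      ((((yMin ≤ z ∧ z ≤ yMax) ∧ 0 ≤ -a1*z+ -b1) ∧ 0 ≤ -a2*z+ -b2) ∧ 0 ≤ -a3*z+ -b3) :=
    fun z => (clipGe_mem (-a3) (-b3) _ _ z).trans (and_congr_left' (g2 z))
  generalize hPdef : (clipGe a3 b3 (clipGe a2 b2 (clipGe a1 b1 yMin yMax).1 (clipGe a1 b1 yMin yMax).2).1
        (clipGe a2 b2 (clipGe a1 b1 yMin yMax).1 (clipGe a1 b1 yMin yMax).2).2) = P at hP ⊢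
  generalize hNdef : (clipGe (-a3) (-b3) (clipGe (-a2) (-b2) (clipGe (-a1) (-b1) yMin yMax).1 (clipGe (-a1) (-b1) yMin yMax).2).1
        (clipGe (-a2) (-b2) (clipGe (-a1) (-b1) yMin yMax).1 (clipGe (-a1) (-b1) yMin yMax).2).2) = N at hN ⊢
  have hsum : ∀ z : Int, (a1*z+b1) + (a2*z+b2) + (a3*z+b3) = b1+b2+b3 := by
    intro z; linear_combination z * hz
  split_ifs with he1 he2
  · -- P empty
    rw [hN y]
    constructor
    · rintro ⟨⟨⟨⟨hr1, hr2⟩, hc1⟩, hc2⟩, hc3⟩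
      exact ⟨hr1, hr2, Or.inr ⟨by linarith, by linarith, by linarith⟩⟩
    · rintro ⟨hr1, hr2, hor | hand⟩
      · exfalso
        have := (hP y).mpr ⟨⟨⟨⟨hr1, hr2⟩, hor.1⟩, hor.2.1⟩, hor.2.2⟩
        omega
      · exact ⟨⟨⟨⟨hr1, hr2⟩, by linarith [hand.1]⟩, by linarith [hand.2.1]⟩, by linarith [hand.2.2]⟩
  · -- N empty
    rw [hP y]
    constructor
    · rintro ⟨⟨⟨⟨hr1, hr2⟩, hc1⟩, hc2⟩, hc3⟩
      exact ⟨hr1, hr2, Or.inl ⟨hc1, hc2, hc3⟩⟩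
    · rintro ⟨hr1, hr2, hor | hand⟩
      · exact ⟨⟨⟨⟨hr1, hr2⟩, hor.1⟩, hor.2.1⟩, hor.2.2⟩
      · exfalso
        have := (hN y).mpr ⟨⟨⟨⟨hr1, hr2⟩, by linarith [hand.1]⟩, by linarith [hand.2.1]⟩, by linarith [hand.2.2]⟩
        omega
  · -- both nonempty
    have hp1 := (hP P.1).mp ⟨le_rfl, by omega⟩
    have hn1 := (hN N.1).mp ⟨le_rfl, by omega⟩
    obtain ⟨⟨⟨⟨hp1a, hp1b⟩, hp1c1⟩, hp1c2⟩, hp1c3⟩ := hp1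
    obtain ⟨⟨⟨⟨hn1a, hn1b⟩, hn1c1⟩, hn1c2⟩, hn1c3⟩ := hn1
    have hB : b1 + b2 + b3 = 0 := by
      have := hsum P.1
      have := hsum N.1
      linarith
    have hPN : ∀ z, (0 ≤ a1*z+b1 ∧ 0 ≤ a2*z+b2 ∧ 0 ≤ a3*z+b3) ↔
        (0 ≤ -a1*z+ -b1 ∧ 0 ≤ -a2*z+ -b2 ∧ 0 ≤ -a3*z+ -b3) := by
      intro z
      have := hsum z
      constructor <;> rintro ⟨u, v, w⟩ <;> exact ⟨by linarith, by linarith, by linarith⟩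
    have hP1N : N.1 ≤ P.1 ∧ P.1 ≤ N.2 := by
      have := (hN P.1).mpr ⟨⟨⟨⟨hp1a, hp1b⟩, ((hPN P.1).mp ⟨hp1c1, hp1c2, hp1c3⟩).1⟩,
        ((hPN P.1).mp ⟨hp1c1, hp1c2, hp1c3⟩).2.1⟩, ((hPN P.1).mp ⟨hp1c1, hp1c2, hp1c3⟩).2.2⟩
      exact this
    have hN1P : P.1 ≤ N.1 ∧ N.1 ≤ P.2 := by
      have := (hP N.1).mpr ⟨⟨⟨⟨hn1a, hn1b⟩, ((hPN N.1).mpr ⟨hn1c1, hn1c2, hn1c3⟩).1⟩,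
        ((hPN N.1).mpr ⟨hn1c1, hn1c2, hn1c3⟩).2.1⟩, ((hPN N.1).mpr ⟨hn1c1, hn1c2, hn1c3⟩).2.2⟩
      exact this
    -- also for the upper ends
    have hp2 := (hP P.2).mp ⟨by omega, le_rfl⟩
    have hn2 := (hN N.2).mp ⟨by omega, le_rfl⟩
    obtain ⟨⟨⟨⟨hp2a, hp2b⟩, hp2c1⟩, hp2c2⟩, hp2c3⟩ := hp2
    obtain ⟨⟨⟨⟨hn2a, hn2b⟩, hn2c1⟩, hn2c2⟩, hn2c3⟩ := hn2
    have hP2N : N.1 ≤ P.2 ∧ P.2 ≤ N.2 :=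
      (hN P.2).mpr ⟨⟨⟨⟨hp2a, hp2b⟩, ((hPN P.2).mp ⟨hp2c1, hp2c2, hp2c3⟩).1⟩,
        ((hPN P.2).mp ⟨hp2c1, hp2c2, hp2c3⟩).2.1⟩, ((hPN P.2).mp ⟨hp2c1, hp2c2, hp2c3⟩).2.2⟩
    have hN2P : P.1 ≤ N.2 ∧ N.2 ≤ P.2 :=
      (hP N.2).mpr ⟨⟨⟨⟨hn2a, hn2b⟩, ((hPN N.2).mpr ⟨hn2c1, hn2c2, hn2c3⟩).1⟩,
        ((hPN N.2).mpr ⟨hn2c1, hn2c2, hn2c3⟩).2.1⟩, ((hPN N.2).mpr ⟨hn2c1, hn2c2, hn2c3⟩).2.2⟩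
    have e1 : min P.1 N.1 = P.1 := by omega
    have e2 : max P.2 N.2 = P.2 := by omega
    simp only [e1, e2]
    rw [hP y]
    constructor
    · rintro ⟨⟨⟨⟨hr1, hr2⟩, hc1⟩, hc2⟩, hc3⟩
      exact ⟨hr1, hr2, Or.inl ⟨hc1, hc2, hc3⟩⟩
    · rintro ⟨hr1, hr2, hor | hand⟩
      · exact ⟨⟨⟨⟨hr1, hr2⟩, hor.1⟩, hor.2.1⟩, hor.2.2⟩
      · have := (hPN y).mpr ⟨by linarith [hand.1], by linarith [hand.2.1], by linarith [hand.2.2]⟩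
        exact ⟨⟨⟨⟨hr1, hr2⟩, this.1⟩, this.2.1⟩, this.2.2⟩

theorem sorted3_minmax (key : Int × Int → Int) (p1 p2 p3 d : Int × Int) :
    key (PySem.List.pyGetD (PySem.List.sorted [p1, p2, p3] key false) 0 d)
      = min (key p1) (min (key p2) (key p3)) ∧
    key (PySem.List.pyGetD (PySem.List.sorted [p1, p2, p3] key false) 2 d)
      = max (key p1) (max (key p2) (key p3)) := by
  have hlen : (PySem.List.sorted [p1, p2, p3] key false).length = 3 := by
    rw [PySem.List.length_sorted]; rfl
  obtain ⟨a, b, c, hs⟩ := List.length_eq_three.mp hlen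
  have hpair := PySem.List.sorted_pairwise (xs := [p1, p2, p3]) (key := key)
  have hperm := PySem.List.sorted_perm (xs := [p1, p2, p3]) (key := key) (rev := false)
  rw [hs] at hpair hperm
  simp only [List.pairwise_cons, List.mem_cons, List.not_mem_nil, or_false,
    forall_eq_or_imp, forall_eq, List.Pairwise.nil, and_true] at hpair
  obtain ⟨⟨hab, hac⟩, hbc⟩ := hpair
  have h1 : p1 = a ∨ p1 = b ∨ p1 = c := by
    have : p1 ∈ [a, b, c] := hperm.mem_iff.mpr (by simp)
    simpa using this
  have h2 : p2 = a ∨ p2 = b ∨ p2 = c := by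
    have : p2 ∈ [a, b, c] := hperm.mem_iff.mpr (by simp)
    simpa using this
  have h3 : p3 = a ∨ p3 = b ∨ p3 = c := by
    have : p3 ∈ [a, b, c] := hperm.mem_iff.mpr (by simp)
    simpa using this
  have ha : a = p1 ∨ a = p2 ∨ a = p3 := by
    have : a ∈ [p1, p2, p3] := hperm.mem_iff.mp (by simp)
    simpa using this
  have hc : c = p1 ∨ c = p2 ∨ c = p3 := by
    have : c ∈ [p1, p2, p3] := hperm.mem_iff.mp (by simp)
    simpa using this
  rw [hs]
  have g0 : PySem.List.pyGetD [a, b, c] (0 : Int) d = a := rfl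
  have g2 : PySem.List.pyGetD [a, b, c] (2 : Int) d = c := rfl
  rw [g0, g2]
  rcases h1 with h1 | h1 | h1 <;> rcases h2 with h2 | h2 | h2 <;> rcases h3 with h3 | h3 | h3 <;>
    rcases ha with ha | ha | ha <;> rcases hc with hc | hc | hc <;> subst_vars <;> omega

theorem filter_pyRange_eq (b : Int) : ∀ (n : Nat) (a c d : Int) (P : Int → Bool),
    (b - a).toNat ≤ n →
    (∀ y, a ≤ y → y < b → (P y = true ↔ c ≤ y ∧ y < d)) →
    (c < d → a ≤ c ∧ d ≤ b) →
    (PySem.List.pyRange a b 1).filter P = PySem.List.pyRange c d 1 := by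
  intro n
  induction n with
  | zero =>
    intro a c d P hn h hc
    have hba : b ≤ a := by omega
    rw [PySem.List.pyRange_one_eq_nil hba, PySem.List.pyRange_one_eq_nil (by
      by_contra hdc
      push_neg at hdc
      obtain ⟨h1, h2⟩ := hc hdc
      omega)]
    rfl
  | succ n ih =>
    intro a c d P hn h hc
    by_cases hab : b ≤ a
    · rw [PySem.List.pyRange_one_eq_nil hab, PySem.List.pyRange_one_eq_nil (by
        by_contra hdc
        push_neg at hdc
        obtain ⟨h1, h2⟩ := hc hdc
        omega)]
      rfl
    · push_neg at hab
      rw [PySem.List.pyRange_one_cons hab, List.filter_cons]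
      by_cases hPa : P a = true
      · have hca : c ≤ a ∧ a < d := (h a le_rfl hab).mp hPa
        have hceq : c = a := by have := hc (by omega); omega
        subst hceq
        rw [PySem.List.pyRange_one_cons hca.2]
        simp only [hPa, if_true]
        congr 1
        exact ih (c + 1) (c + 1) d P (by omega)
          (fun y hy1 hy2 => by rw [h y (by omega) hy2]; omega)
          (fun hlt => ⟨le_rfl, (hc (by omega)).2⟩)
      · simp only [hPa]
        simp only [Bool.false_eq_true, if_false]
        refine ih (a + 1) c d P (by omega)
          (fun y hy1 hy2 => h y (by omega) hy2)
          (fun hlt => ?_)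
        obtain ⟨h1, h2⟩ := hc hlt
        refine ⟨?_, h2⟩
        by_contra hac
        push_neg at hac
        exact hPa ((h a le_rfl hab).mpr ⟨by omega, by omega⟩)

theorem row_eq (x ymn ymx : Int) (pred : Int → Bool) (G : Int × Int)
    (hG : ∀ y, (G.1 ≤ y ∧ y ≤ G.2) ↔ (ymn ≤ y ∧ y ≤ ymx ∧ pred y = true)) :
    List.map (Prod.mk x) (List.filter pred (PySem.List.pyRange ymn (ymx + 1) 1)) =
      List.map (fun y => (x, y)) (PySem.List.pyRange G.1 (G.2 + 1) 1) := by
  rw [filter_pyRange_eq (ymx + 1) ((ymx + 1) - ymn).toNat ymn G.1 (G.2 + 1) pred (by omega)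
    (fun y h1 h2 => by
      constructor
      · intro hp
        have := (hG y).mpr ⟨h1, by omega, hp⟩
        omega
      · intro hb
        exact ((hG y).mp ⟨by omega, by omega⟩).2.2)
    (fun hlt => by
      have h1 := (hG G.1).mp ⟨le_rfl, by omega⟩
      have h2 := (hG G.2).mp ⟨by omega, le_rfl⟩
      omega)]

theorem trianglePixels_spec : Claim_equal_trianglePixels := by
  intro triangle hdom hpre
  unfold Spec_trianglePixels
  obtain ⟨q1, q2, q3, htri⟩ := List.length_eq_three.mp hpre
  obtain ⟨x1, y1⟩ := q1; obtain ⟨x2, y2⟩ := q2; obtain ⟨x3, y3⟩ := q3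
  subst htri
  have hx := sorted3_minmax (fun p => p.1) (x1,y1) (x2,y2) (x3,y3) (0,0)
  have hy := sorted3_minmax (fun p => p.2) (x1,y1) (x2,y2) (x3,y3) (0,0)
  simp only at hx hy
  unfold trianglePixels trianglePixels_alt
  simp only [hx.1, hx.2, hy.1, hy.2]
  apply PySem.List.foldl_congr_mem
  intro acc x hxmem
  rw [PySem.List.foldl_append_if]
  congr 1
  have hins : ∀ yy : Int, (insideTriangle (x, yy) [(x1,y1),(x2,y2),(x3,y3)] = true) ↔
      ((0 ≤ (x2 - x1)*yy + (-(x2 - x1) * y1 - (y2 - y1) * (x - x1)) ∧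
        0 ≤ (x3 - x2)*yy + (-(x3 - x2) * y2 - (y3 - y2) * (x - x2)) ∧
        0 ≤ (x1 - x3)*yy + (-(x1 - x3) * y3 - (y1 - y3) * (x - x3))) ∨
       ((x2 - x1)*yy + (-(x2 - x1) * y1 - (y2 - y1) * (x - x1)) ≤ 0 ∧
        (x3 - x2)*yy + (-(x3 - x2) * y2 - (y3 - y2) * (x - x2)) ≤ 0 ∧
        (x1 - x3)*yy + (-(x1 - x3) * y3 - (y1 - y3) * (x - x3)) ≤ 0)) := by
    intro yy
    simp only [insideTriangle, crossProductVect, decide_eq_true_eq, ge_iff_le]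
    constructor <;> rintro (⟨u, v, w⟩ | ⟨u, v, w⟩)
    · exact Or.inl ⟨by linarith, by linarith, by linarith⟩
    · exact Or.inr ⟨by linarith, by linarith, by linarith⟩
    · exact Or.inl ⟨by linarith, by linarith, by linarith⟩
    · exact Or.inr ⟨by linarith, by linarith, by linarith⟩
  have hrow := rowInterval_spec (x2 - x1) (-(x2 - x1) * y1 - (y2 - y1) * (x - x1))
      (x3 - x2) (-(x3 - x2) * y2 - (y3 - y2) * (x - x2))
      (x1 - x3) (-(x1 - x3) * y3 - (y1 - y3) * (x - x3))
      (min y1 (min y2 y3)) (max y1 (max y2 y3)) (by ring)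
  exact row_eq x (min y1 (min y2 y3)) (max y1 (max y2 y3)) _ _
    (fun y => (hrow y).trans
      (and_congr_right fun _ => and_congr_right fun _ => (hins y).symm))
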